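-- pv_equiv track=rewrite | github.com/Junkyu-Lim/Quant-service | quant_screener.py | count_consecutive_growth
-- ===== SOURCE A (Python) =====
-- def count_consecutive_growth(series_dict):
--     if len(series_dict) < 2:
--         return 0
--     vals = [series_dict[d] for d in sorted(series_dict.keys())]
--     count = 0
--     for i in range(len(vals) - 1, 0, -1):
--         if vals[i] > vals[i - 1] and vals[i - 1] > 0:
--             count += 1
--         else:
--             break
--     return count
-- ===== SOURCE B (Python) =====
-- def count_consecutive_growth(series_dict):
--     vals = [series_dict[d] for d in sorted(series_dict.keys())]
--     streak = 0
--     for prev, cur in zip(vals, vals[1:]):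
--         streak = streak + 1 if cur > prev and prev > 0 else 0
--     return streak
-- ===== Notes on version B (the rewrite author's own statement) =====
-- stated objective: alternative
-- what changed: Replaces the backward index scan with early break (and its len<2 guard) by a single forward pass over adjacent pairs zip(vals, vals[1:]) that increments a streak counter on growth and resets it to 0 otherwise; the final streak equals the length of the trailing growth run.
import Mathlib
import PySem

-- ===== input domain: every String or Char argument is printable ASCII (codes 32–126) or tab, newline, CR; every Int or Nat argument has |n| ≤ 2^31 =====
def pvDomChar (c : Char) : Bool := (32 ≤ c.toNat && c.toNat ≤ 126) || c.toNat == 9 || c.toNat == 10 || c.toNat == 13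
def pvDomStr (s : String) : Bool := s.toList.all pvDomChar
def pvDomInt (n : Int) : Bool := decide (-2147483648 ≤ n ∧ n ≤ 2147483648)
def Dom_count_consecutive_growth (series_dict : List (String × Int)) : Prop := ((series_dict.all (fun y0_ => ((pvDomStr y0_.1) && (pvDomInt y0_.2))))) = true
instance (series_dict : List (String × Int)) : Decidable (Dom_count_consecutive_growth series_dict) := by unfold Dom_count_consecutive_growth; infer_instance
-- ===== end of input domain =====

-- B replaces A's backward early-break index scan (with len<2 guard) by one forward pass over
-- adjacent pairs that resets a streak counter on non-growth; same result, same cost (alternative).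


-- ===== PORT A =====
-- the 'for i in range(len(vals)-1, 0, -1): … else: break' loop; the break returns the
-- accumulated count. Indices i, i-1 are always in range, so pyGetD is exact for vals[i].
def cagLoop (vals : List Int) : List Int → Int → Int
  | [], count => count
  | i :: rest, count =>
      if PySem.List.pyGetD vals i 0 > PySem.List.pyGetD vals (i - 1) 0 ∧
         PySem.List.pyGetD vals (i - 1) 0 > 0 then
        cagLoop vals rest (count + 1)
      else count

def count_consecutive_growth (series_dict : List (String × Int)) : Int :=
  let d := PySem.Dict.ofList series_dict
  if d.size < 2 then 0
  else
    let vals := (PySem.List.sorted d.keys (fun k => k) false).map (fun k => d.getD k 0)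
    cagLoop vals (PySem.List.pyRange ((vals.length : Int) - 1) 0 (-1)) 0

-- ===== PORT B =====
def count_consecutive_growth_alt (series_dict : List (String × Int)) : Int :=
  let d := PySem.Dict.ofList series_dict
  let vals := (PySem.List.sorted d.keys (fun k => k) false).map (fun k => d.getD k 0)
  (vals.zip (PySem.List.slice vals (some 1) none)).foldl
    (fun streak pc => if pc.2 > pc.1 ∧ pc.1 > 0 then streak + 1 else 0) 0

-- ===== PRECONDITION & SPEC =====
def Spec_count_consecutive_growth (series_dict : List (String × Int)) (out : Int) : Prop := out = count_consecutive_growth_alt series_dict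
instance (series_dict : List (String × Int)) (out : Int) : Decidable (Spec_count_consecutive_growth series_dict out) := by unfold Spec_count_consecutive_growth; infer_instance

-- ===== CLAIM (what is proved, stated in full; the proofs are below) =====
def Claim_equal_count_consecutive_growth : Prop := ∀ (series_dict : List (String × Int)), Dom_count_consecutive_growth series_dict → Spec_count_consecutive_growth series_dict (count_consecutive_growth series_dict)

-- ===== LEMMAS AND PROOFS =====

-- the streak step of B's fold
def cagStep (streak : Int) (pc : Int × Int) : Int :=
  if pc.2 > pc.1 ∧ pc.1 > 0 then streak + 1 else 0

-- incrementing the accumulator increments the result (break returns it unchanged)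
theorem cagLoop_add_one (vals : List Int) (idxs : List Int) (c : Int) :
    cagLoop vals idxs (c + 1) = cagLoop vals idxs c + 1 := by
  induction idxs generalizing c with
  | nil => rfl
  | cons i rest ih =>
      simp only [cagLoop]
      split_ifs with h
      · exact ih (c + 1)
      · rfl

-- indices strictly below vals.length do not see an appended element
theorem cagLoop_append_irrel (vals : List Int) (x : Int) (idxs : List Int) (c : Int)
    (hb : ∀ i ∈ idxs, 0 < i ∧ i < (vals.length : Int)) :
    cagLoop (vals ++ [x]) idxs c = cagLoop vals idxs c := by
  induction idxs generalizing c with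
  | nil => rfl
  | cons i rest ih =>
      obtain ⟨h0, h1⟩ := hb i (by simp)
      have e1 : PySem.List.pyGetD (vals ++ [x]) i 0 = PySem.List.pyGetD vals i 0 := by
        rw [PySem.List.pyGetD_eq_getElem _ _ (by omega) (by simp; omega),
            PySem.List.pyGetD_eq_getElem _ _ (by omega) (by omega)]
        exact List.getElem_append_left (by omega)
      have e2 : PySem.List.pyGetD (vals ++ [x]) (i - 1) 0 = PySem.List.pyGetD vals (i - 1) 0 := by
        rw [PySem.List.pyGetD_eq_getElem _ _ (by omega) (by simp; omega),
            PySem.List.pyGetD_eq_getElem _ _ (by omega) (by omega)]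
        exact List.getElem_append_left (by omega)
      simp only [cagLoop, e1, e2]
      split_ifs with h
      · exact ih (c + 1) (fun j hj => hb j (by simp [hj]))
      · rfl

-- adjacent pairs of vals ++ [x]
theorem zip_tail_append (vals : List Int) (x : Int) (h : vals ≠ []) :
    (vals ++ [x]).zip (vals ++ [x]).tail
      = vals.zip vals.tail ++ [(vals.getLast h, x)] := by
  induction vals with
  | nil => exact absurd rfl h
  | cons a t ih =>
      cases t with
      | nil => simp
      | cons b t' =>
          have := ih (by simp)
          simp only [List.cons_append, List.tail_cons, List.zip_cons_cons] at this ⊢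
          rw [List.getLast_cons (by simp), this]

-- main lemma: A's backward break-scan equals B's forward reset-fold, for any value list
theorem cag_main (vals : List Int) :
    cagLoop vals (PySem.List.pyRange ((vals.length : Int) - 1) 0 (-1)) 0
      = (vals.zip vals.tail).foldl cagStep 0 := by
  induction vals using List.reverseRecOn with
  | nil =>
      rw [show ((([]:List Int).length : Int) - 1) = -1 by simp,
          PySem.List.pyRange_neg_one_eq_nil (by omega)]
      rfl
  | append_singleton vals x ih =>
      by_cases hne : vals = []
      · subst hne
        simp only [List.nil_append]
        rw [show ((([x]:List Int).length : Int) - 1) = 0 by simp,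
            PySem.List.pyRange_neg_one_eq_nil le_rfl]
        rfl
      · have hn : (0:Int) < (vals.length : Int) := by
          have := List.length_pos_iff.mpr hne; exact_mod_cast this
        have hlen : (((vals ++ [x]).length : Int) - 1) = (vals.length : Int) := by
          simp
        rw [hlen, PySem.List.pyRange_neg_one_cons hn, zip_tail_append vals x hne,
            List.foldl_append]
        have eg1 : PySem.List.pyGetD (vals ++ [x]) (vals.length : Int) 0 = x := by
          rw [PySem.List.pyGetD_eq_getElem _ _ (by omega) (by simp)]
          simp
        have eg2 : PySem.List.pyGetD (vals ++ [x]) ((vals.length : Int) - 1) 0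
            = vals.getLast hne := by
          rw [PySem.List.pyGetD_eq_getElem _ _ (by omega) (by simp)]
          have ht : ((vals.length : Int) - 1).toNat = vals.length - 1 := by omega
          rw [List.getElem_append_left (by simp [ht]; omega)]
          simp only [ht]
          exact (List.getLast_eq_getElem hne).symm
        simp only [cagLoop, eg1, eg2]
        have hrest : ∀ i ∈ PySem.List.pyRange ((vals.length : Int) - 1) 0 (-1),
            0 < i ∧ i < (vals.length : Int) := by
          intro i hi
          rw [PySem.List.mem_pyRange_neg_one] at hi
          omega
        split_ifs with h
        · rw [cagLoop_add_one, cagLoop_append_irrel vals x _ 0 hrest, ih]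
          simp [cagStep, h.1, h.2]
        · simp only [List.foldl_cons, List.foldl_nil, cagStep]
          rw [if_neg (by tauto)]

-- a list of fewer than two elements has no adjacent pairs
theorem zip_tail_short (vals : List Int) (h : vals.length < 2) : vals.zip vals.tail = [] := by
  match vals, h with
  | [], _ => rfl
  | [a], _ => rfl

-- ===== VERDICT (by name: the statement is the Claim_ definition above) =====
theorem count_consecutive_growth_spec : Claim_equal_count_consecutive_growth := by
  intro series_dict _
  show count_consecutive_growth series_dict = count_consecutive_growth_alt series_dict
  unfold count_consecutive_growth count_consecutive_growth_alt
  simp only [PySem.List.slice_from_one]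
  by_cases hs : (PySem.Dict.ofList series_dict).size < 2
  · rw [if_pos hs]
    rw [zip_tail_short _ (by
      simp only [List.length_map, PySem.List.length_sorted, PySem.Dict.keys, List.length_map]
      simpa [PySem.Dict.size] using hs)]
    rfl
  · rw [if_neg hs]
    exact cag_main _
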